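-- pv_equiv track=rewrite | github.com/Seventy-Times-Agency/Leadgen | src/leadgen/collectors/website.py | _is_generic_email
-- ===== SOURCE A (Python) =====
-- _GENERIC_EMAIL_LOCALS = frozenset(
--     {
--         "info",
--         "hello",
--         "hi",
--         "contact",
--         "contacts",
--         "support",
--         "help",
--         "admin",
--         "office",
--         "mail",
--         "email",
--         "team",
--         "noreply",
--         "no-reply",
--         "donotreply",
--         "do-not-reply",
--         "reply",
--         "sales",  # kept loose; a user selling to sales leads might disagree
--         "enquiry",
--         "enquiries",
--         "inquiry",
--         "inquiries",
--         "feedback",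
--         "marketing",
--         "pr",
--         "webmaster",
--         "postmaster",
--         "abuse",
--         "privacy",
--         "legal",
--     }
-- )
--
-- def _is_generic_email(email: str) -> bool:
--     local = email.split("@", 1)[0].lower()
--     # Match on exact local-part or local that starts with a generic name
--     # followed by a common separator ("info-uk", "support.en", "sales+usa").
--     if local in _GENERIC_EMAIL_LOCALS:
--         return True
--     for prefix in _GENERIC_EMAIL_LOCALS:
--         if local.startswith(prefix) and len(local) > len(prefix):
--             sep = local[len(prefix)]
--             if sep in "-_.+":
--                 return True
--     return False
-- ===== SOURCE B (Python) =====
-- _GENERIC_EMAIL_LOCALS = frozenset(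
--     {
--         "info", "hello", "hi", "contact", "contacts", "support", "help",
--         "admin", "office", "mail", "email", "team", "noreply", "no-reply",
--         "donotreply", "do-not-reply", "reply", "sales", "enquiry",
--         "enquiries", "inquiry", "inquiries", "feedback", "marketing", "pr",
--         "webmaster", "postmaster", "abuse", "privacy", "legal",
--     }
-- )
--
--
-- def _is_generic_email(email: str) -> bool:
--     local = email.split("@", 1)[0].lower()
--
--     # Single pass over the local part carrying the prefix read so far: at each
--     # separator, test whether that prefix is a generic name; after the pass,
--     # test the whole local part (the exact-match case).
--     prefix = ""
--     for ch in local: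
--         if ch in "-_.+" and prefix in _GENERIC_EMAIL_LOCALS:
--             return True
--         prefix += ch
--     return local in _GENERIC_EMAIL_LOCALS
-- ===== Notes on version B (the rewrite author's own statement) =====
-- stated objective: alternative
-- what changed: A first tests exact membership and then scans all 30 generic names with startswith plus a separator check; B makes one pass over the local part carrying the prefix read so far, testing set membership of that prefix at each separator and of the whole local part after the pass.
import Mathlib
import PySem

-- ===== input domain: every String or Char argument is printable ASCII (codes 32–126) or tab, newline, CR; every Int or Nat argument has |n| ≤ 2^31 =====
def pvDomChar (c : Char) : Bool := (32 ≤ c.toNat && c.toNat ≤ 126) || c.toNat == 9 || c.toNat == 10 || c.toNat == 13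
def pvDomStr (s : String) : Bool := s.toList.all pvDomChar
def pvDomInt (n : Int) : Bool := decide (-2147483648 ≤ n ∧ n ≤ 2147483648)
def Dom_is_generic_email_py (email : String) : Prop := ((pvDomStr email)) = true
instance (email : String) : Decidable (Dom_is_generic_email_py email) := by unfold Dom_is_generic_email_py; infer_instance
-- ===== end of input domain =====

-- B replaces A's scan of the whole generic-name set (startswith + separator
-- check per name) by one pass over the local part that carries the prefix read
-- so far; same result, a different traversal (objective: alternative).

-- the module constant _GENERIC_EMAIL_LOCALS (a frozenset of strings; only
-- membership is used, so listing order is irrelevant)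
def genericLocals : List (List Char) :=
  ["info".toList, "hello".toList, "hi".toList, "contact".toList, "contacts".toList,
   "support".toList, "help".toList, "admin".toList, "office".toList, "mail".toList,
   "email".toList, "team".toList, "noreply".toList, "no-reply".toList,
   "donotreply".toList, "do-not-reply".toList, "reply".toList, "sales".toList,
   "enquiry".toList, "enquiries".toList, "inquiry".toList, "inquiries".toList,
   "feedback".toList, "marketing".toList, "pr".toList, "webmaster".toList,
   "postmaster".toList, "abuse".toList, "privacy".toList, "legal".toList]

-- the string literal "-_.+"
def sepChars : List Char := ['-', '_', '.', '+']

-- ===== PORT A =====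
-- email.split("@", 1)[0].lower(): split('@',1) never raises (separator nonempty)
-- and always returns a nonempty list, so .getD []/.headD [] are exact here.
def is_generic_email_py (email : String) : Bool :=
  let locl := PySem.Chars.lower (((PySem.Chars.splitMax? email.toList ['@'] 1).getD []).headD [])
  if genericLocals.contains locl then true
  else
    -- for prefix in _GENERIC_EMAIL_LOCALS: … return True / fall through
    genericLocals.any (fun pfx =>
      if PySem.Chars.startswith locl pfx && decide (pfx.length < locl.length) then
        -- sep = local[len(prefix)] (in range under the guard); sep in "-_.+"
        match PySem.List.pyGet? locl ((pfx.length : Int)) with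
        | some sep => PySem.Chars.isIn [sep] sepChars
        | none => false
      else false)

-- ===== PORT B =====
-- Source B's 'for ch in local' loop with its prefix accumulator, as structural
-- recursion over the remaining characters; 'local' is passed along for the
-- end-of-pass exact-match test
def altWalk (locl : List Char) (pfx : List Char) : List Char → Bool
  | [] => genericLocals.contains locl
  | ch :: rest =>
      if PySem.Chars.isIn [ch] sepChars && genericLocals.contains pfx then true
      else altWalk locl (pfx ++ [ch]) rest

def is_generic_email_py_alt (email : String) : Bool :=
  let locl := PySem.Chars.lower (((PySem.Chars.splitMax? email.toList ['@'] 1).getD []).headD [])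
  altWalk locl [] locl

-- ===== PRECONDITION & SPEC =====
def Spec_is_generic_email_py (email : String) (out : Bool) : Prop := out = is_generic_email_py_alt email
instance (email : String) (out : Bool) : Decidable (Spec_is_generic_email_py email out) := by unfold Spec_is_generic_email_py; infer_instance

-- ===== CLAIM (what is proved, stated in full; the proofs are below) =====
def Claim_equal_is_generic_email_py : Prop := ∀ (email : String), Dom_is_generic_email_py email → Spec_is_generic_email_py email (is_generic_email_py email)

-- ===== LEMMAS AND PROOFS =====

lemma isIn_singleton_iff (c : Char) (s : List Char) :
    PySem.Chars.isIn [c] s = true ↔ c ∈ s := by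
  rw [PySem.Chars.isIn_iff_infix]
  constructor
  · intro h; exact h.mem (List.mem_singleton_self c)
  · intro h
    obtain ⟨l₁, l₂, rfl⟩ := List.append_of_mem h
    exact ⟨l₁, l₂, by simp⟩

-- the separator-prefix property both loops decide
def SepPrefix (l : List Char) : Prop :=
  ∃ i : Nat, ∃ _ : i < l.length, l[i] ∈ sepChars ∧ genericLocals.contains (l.take i) = true

-- A's for-loop answers exactly SepPrefix
lemma A_loop_iff (l : List Char) :
    (genericLocals.any (fun pfx =>
      if PySem.Chars.startswith l pfx && decide (pfx.length < l.length) then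
        match PySem.List.pyGet? l ((pfx.length : Int)) with
        | some sep => PySem.Chars.isIn [sep] sepChars
        | none => false
      else false)) = true ↔ SepPrefix l := by
  rw [List.any_eq_true]
  constructor
  · rintro ⟨pfx, hpfx, hA⟩
    split at hA
    case isFalse => simp at hA
    case isTrue hguard =>
      rw [Bool.and_eq_true, decide_eq_true_iff] at hguard
      obtain ⟨hsw, hlt⟩ := hguard
      have hpre : pfx <+: l := (PySem.Chars.startswith_iff l pfx).mp hsw
      match hget : PySem.List.pyGet? l ((pfx.length : Int)) with
      | none => rw [hget] at hA; simp at hA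
      | some sep =>
        rw [hget] at hA
        have hget' : l[pfx.length]? = some sep := by
          rw [PySem.List.pyGet?_natCast] at hget; exact hget
        refine ⟨pfx.length, hlt, ?_, ?_⟩
        · have := List.getElem?_eq_getElem hlt
          rw [this] at hget'
          rw [Option.some_inj.mp hget']
          simp only [] at hA
          exact (isIn_singleton_iff sep sepChars).mp hA
        · have htake : l.take pfx.length = pfx := (List.prefix_iff_eq_take.mp hpre).symm
          rw [htake, List.contains_eq_mem]; simpa using hpfx
  · rintro ⟨i, hi, hsep, hcont⟩
    rw [List.contains_eq_mem, decide_eq_true_iff] at hcont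
    refine ⟨l.take i, hcont, ?_⟩
    have hlen : (l.take i).length = i := by simp [Nat.le_of_lt hi]
    have hsw : PySem.Chars.startswith l (l.take i) = true :=
      (PySem.Chars.startswith_iff l (l.take i)).mpr (List.take_prefix i l)
    rw [hsw]
    have hguard : (true && decide ((l.take i).length < l.length)) = true := by
      simp [hlen, hi]
    rw [hguard]
    simp only [if_true]
    have hget : PySem.List.pyGet? l (((l.take i).length : Nat) : Int) = some l[i] := by
      rw [PySem.List.pyGet?_natCast, hlen]
      exact List.getElem?_eq_getElem hi
    rw [hget]
    exact (isIn_singleton_iff _ _).mpr hsep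

-- B's walk answers "a separator-prefix inside rest (extending pfx), or the exact match"
lemma walk_iff (locl : List Char) (rest : List Char) : ∀ pfx : List Char,
    altWalk locl pfx rest = true ↔
      ((∃ i : Nat, ∃ _ : i < rest.length, rest[i] ∈ sepChars ∧
          genericLocals.contains (pfx ++ rest.take i) = true)
        ∨ genericLocals.contains locl = true) := by
  induction rest with
  | nil => intro pfx; simp [altWalk]
  | cons ch rest ih =>
    intro pfx
    simp only [altWalk]
    split
    case isTrue hguard =>
      rw [Bool.and_eq_true] at hguard
      simp only [true_iff]
      left
      exact ⟨0, by simp, by simpa using (isIn_singleton_iff ch sepChars).mp hguard.1,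
             by simpa using hguard.2⟩
    case isFalse hguard =>
      rw [ih (pfx ++ [ch])]
      constructor
      · rintro (⟨i, hi, hs, hc⟩ | h)
        · exact Or.inl ⟨i + 1, by simpa using hi, by simpa using hs,
            by simpa [List.append_assoc] using hc⟩
        · exact Or.inr h
      · rintro (⟨i, hi, hs, hc⟩ | h)
        · cases i with
          | zero =>
            exfalso
            apply hguard
            rw [Bool.and_eq_true]
            exact ⟨(isIn_singleton_iff ch sepChars).mpr (by simpa using hs), by simpa using hc⟩
          | succ j =>
            exact Or.inl ⟨j, by simpa using hi, by simpa using hs,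
              by simpa [List.append_assoc] using hc⟩
        · exact Or.inr h

-- ===== VERDICT (by name: the statement is the Claim_ definition above) =====
theorem is_generic_email_py_spec : Claim_equal_is_generic_email_py := by
  intro email _
  unfold Spec_is_generic_email_py is_generic_email_py is_generic_email_py_alt
  generalize PySem.Chars.lower (((PySem.Chars.splitMax? email.toList ['@'] 1).getD []).headD []) = l
  by_cases h : genericLocals.contains l = true
  · rw [if_pos h, Eq.comm, walk_iff]
    exact Or.inr h
  · rw [if_neg h]
    rw [Bool.eq_iff_iff, A_loop_iff, walk_iff]
    unfold SepPrefix
    simp only [List.nil_append]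
    constructor
    · exact Or.inl
    · rintro (hp | hc)
      · exact hp
      · exact absurd hc h
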